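-- pv_equiv track=rewrite | github.com/saiswethakapa/become_coder_python | sum of digits of a num in list.py | sod
-- ===== SOURCE A (Python) =====
-- def sod(data):
--     s=0
--     a=[]
--     for i in data:
--         while i:
--             r=i%10
--             i//=10
--             s=s+r
--         a.append(s)
--         s=0
--     return a
-- ===== SOURCE B (Python) =====
-- def sod(data):
--     return [sum(int(c) for c in str(i)) for i in data]
-- ===== Notes on version B (the rewrite author's own statement) =====
-- stated objective: idiomatic
-- what changed: Replaces the explicit accumulator loop with manual %10 / //=10 digit peeling by a single list comprehension summing the digits of str(i) character-wise.
import Mathlib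
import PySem

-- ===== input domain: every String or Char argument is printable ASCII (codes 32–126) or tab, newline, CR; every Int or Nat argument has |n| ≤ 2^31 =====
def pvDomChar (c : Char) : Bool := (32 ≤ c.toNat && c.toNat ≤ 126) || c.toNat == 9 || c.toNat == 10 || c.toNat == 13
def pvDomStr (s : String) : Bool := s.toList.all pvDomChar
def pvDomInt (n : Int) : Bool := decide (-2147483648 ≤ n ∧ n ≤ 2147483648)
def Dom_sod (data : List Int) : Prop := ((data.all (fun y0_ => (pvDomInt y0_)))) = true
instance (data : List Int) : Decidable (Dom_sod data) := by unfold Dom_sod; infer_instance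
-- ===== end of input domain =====

-- B replaces the manual %10 / //=10 digit-peeling accumulator loop by a list
-- comprehension summing the characters of str(i) (idiomatic; same cost).


-- ===== PORT A =====
-- the 'while i:' loop of A; guard '0 < i' makes it total: on negative i the
-- Python loop never terminates (such inputs are excluded by Pre_sod)
def sodLoop (i s : Int) : Int :=
  if _h : 0 < i then
    sodLoop (PySem.Int.floordiv i 10) (s + PySem.Int.mod i 10)
  else s
termination_by i.toNat
decreasing_by
  have : PySem.Int.floordiv i 10 = i / 10 := PySem.Int.floordiv_eq_ediv_of_pos (by omega)
  rw [this]; omega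

def sod (data : List Int) : List Int :=
  (data.foldl (fun (acc : Int × List Int) i =>
      let s := sodLoop i acc.1
      (0, acc.2 ++ [s])) (0, [])).2

-- ===== PORT B =====
-- int(c) for a decimal digit character c is its code minus 48; exact here since
-- str(i) for i ≥ 0 (Pre_sod) consists of digit characters only
def sod_alt (data : List Int) : List Int :=
  data.map (fun i => ((PySem.Int.toChars i).map (fun c => (c.toNat : Int) - 48)).sum)

-- ===== PRECONDITION & SPEC =====
-- Pre_ excludes negative elements: A's while-loop never terminates on them
-- (i //= 10 fixes at -1), and B raises ValueError on the '-' character.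
def Pre_sod (data : List Int) : Prop := ∀ x ∈ data, 0 ≤ x
instance (data : List Int) : Decidable (Pre_sod data) := by unfold Pre_sod; infer_instance
def pvWitness_sod : List Int := [0, 5, 123, 999]

def Spec_sod (data : List Int) (out : List Int) : Prop := out = sod_alt data
instance (data : List Int) (out : List Int) : Decidable (Spec_sod data out) := by unfold Spec_sod; infer_instance

-- ===== CLAIM (what is proved, stated in full; the proofs are below) =====
def Claim_equal_sod : Prop := ∀ (data : List Int), Dom_sod data → Pre_sod data → Spec_sod data (sod data)

-- ===== LEMMAS AND PROOFS =====

lemma digitChar_val {r : Nat} (h : r < 10) :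
    ((Nat.digitChar r).toNat : Int) - 48 = (r : Int) := by
  interval_cases r <;> decide

lemma charSum_toDigitsCore (fuel : Nat) : ∀ n ds, n < fuel →
    ((Nat.toDigitsCore 10 fuel n ds).map (fun c => (c.toNat : Int) - 48)).sum
      = ((Nat.digits 10 n).sum : Int)
        + ((ds.map (fun c => (c.toNat : Int) - 48)).sum) := by
  induction fuel with
  | zero => intro n ds h; omega
  | succ f ih =>
    intro n ds h
    rw [Nat.toDigitsCore]
    by_cases h0 : n = 0
    · subst h0; simp [digitChar_val (by omega : (0 : Nat) % 10 < 10)]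
    · have hd : Nat.digits 10 n = n % 10 :: Nat.digits 10 (n / 10) :=
        Nat.digits_def' (by norm_num) (Nat.pos_of_ne_zero h0)
      by_cases hq : n / 10 = 0
      · simp only [hq, reduceIte]
        rw [hd, hq, Nat.digits_zero]
        simp [digitChar_val (Nat.mod_lt n (by norm_num))]
      · have hlt : n / 10 < f := by
          have h1 : n / 10 < n := Nat.div_lt_self (Nat.pos_of_ne_zero h0) (by norm_num)
          omega
        simp only [hq, reduceIte]
        rw [ih (n / 10) _ hlt, hd]
        simp [digitChar_val (Nat.mod_lt n (by norm_num))]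
        ring

lemma charSum_toChars (n : Nat) :
    ((PySem.Int.toChars (n : Int)).map (fun c => (c.toNat : Int) - 48)).sum
      = ((Nat.digits 10 n).sum : Int) := by
  have : PySem.Int.toChars (n : Int) = Nat.toDigits 10 n := by
    simp [PySem.Int.toChars]
  rw [this, Nat.toDigits]
  simpa using charSum_toDigitsCore (n + 1) n [] (Nat.lt_succ_self n)

lemma sodLoop_eq (n : Nat) : ∀ s : Int,
    sodLoop (n : Int) s = s + ((Nat.digits 10 n).sum : Int) := by
  induction n using Nat.strong_induction_on with
  | _ n ih =>
    intro s
    rw [sodLoop]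
    by_cases h0 : n = 0
    · subst h0; simp
    · have hpos : (0 : Int) < (n : Int) := by exact_mod_cast Nat.pos_of_ne_zero h0
      rw [dif_pos hpos]
      have hfd : PySem.Int.floordiv (n : Int) 10 = ((n / 10 : Nat) : Int) := by
        exact_mod_cast PySem.Int.floordiv_natCast n 10
      have hmd : PySem.Int.mod (n : Int) 10 = ((n % 10 : Nat) : Int) := by
        exact_mod_cast PySem.Int.mod_natCast n 10
      rw [hfd, hmd, ih (n / 10) (Nat.div_lt_self (Nat.pos_of_ne_zero h0) (by norm_num))]
      rw [Nat.digits_def' (by norm_num : (1:Nat) < 10) (Nat.pos_of_ne_zero h0)]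
      push_cast
      simp only [List.map_cons, List.sum_cons]
      push_cast; ring

lemma sod_foldl (data : List Int) (hp : ∀ x ∈ data, 0 ≤ x) : ∀ pre : List Int,
    (data.foldl (fun (acc : Int × List Int) i =>
        let s := sodLoop i acc.1
        (0, acc.2 ++ [s])) (0, pre)).2
      = pre ++ sod_alt data := by
  induction data with
  | nil => intro pre; simp [sod_alt]
  | cons x xs ih =>
    intro pre
    have hx : 0 ≤ x := hp x (List.mem_cons_self)
    have hxs : ∀ y ∈ xs, 0 ≤ y := fun y hy => hp y (List.mem_cons_of_mem _ hy)
    simp only [List.foldl_cons]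
    rw [ih hxs]
    have : sodLoop x 0 = ((Nat.digits 10 x.toNat).sum : Int) := by
      have := sodLoop_eq x.toNat 0
      rw [Int.toNat_of_nonneg hx] at this
      simpa using this
    have hb : sod_alt (x :: xs) = ((Nat.digits 10 x.toNat).sum : Int) :: sod_alt xs := by
      simp only [sod_alt, List.map_cons]
      congr 1
      have := charSum_toChars x.toNat
      rwa [Int.toNat_of_nonneg hx] at this
    rw [hb, this]
    simp

-- ===== VERDICT (by name: the statement is the Claim_ definition above) =====
theorem sod_spec : Claim_equal_sod := by
  intro data _ hp
  unfold Spec_sod sod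
  simpa using sod_foldl data hp []
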